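-- pv_equiv track=rewrite | github.com/warramma/solutions---tip102 | unit2/set1/problem9_stage_arrangement.py | num_VIP_guests
-- ===== SOURCE A (Python) =====
-- def num_VIP_guests(vip_passes, guests):
--     vip_set = set() #creates an empty set
--     for character in vip_passes:
--         vip_set.add(character) #add charcter to set
--     counter = 0 #initialize counter
--
--     for character in guests:
--         if character in vip_set:
--             counter += 1
--
--     return counter
-- ===== SOURCE B (Python) =====
-- def num_VIP_guests(vip_passes, guests):
--     counts = {}
--     for g in guests:
--         counts[g] = counts.get(g, 0) + 1
--     return sum(counts.get(v, 0) for v in set(vip_passes))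
-- ===== Notes on version B (the rewrite author's own statement) =====
-- stated objective: alternative
-- what changed: B builds a frequency table of guests and sums the counts of the distinct vip passes, instead of A's set of vip passes consulted while looping over guests.
import Mathlib
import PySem

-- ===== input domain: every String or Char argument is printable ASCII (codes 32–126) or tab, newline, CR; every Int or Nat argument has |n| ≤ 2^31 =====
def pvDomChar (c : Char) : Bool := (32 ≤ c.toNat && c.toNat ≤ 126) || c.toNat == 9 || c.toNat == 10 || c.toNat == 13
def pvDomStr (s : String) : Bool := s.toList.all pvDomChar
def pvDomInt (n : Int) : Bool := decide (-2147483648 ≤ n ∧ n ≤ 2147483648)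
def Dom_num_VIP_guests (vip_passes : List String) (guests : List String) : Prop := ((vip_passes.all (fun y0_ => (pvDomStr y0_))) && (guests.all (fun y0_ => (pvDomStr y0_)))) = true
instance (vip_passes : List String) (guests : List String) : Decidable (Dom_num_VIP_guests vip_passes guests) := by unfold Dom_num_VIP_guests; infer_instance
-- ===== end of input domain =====

-- B replaces A's vip-set + guest loop by a guest frequency table summed over the distinct vip passes (alternative decomposition; return value only, no mutation).
-- ===== PORT A =====
def num_VIP_guests (vip_passes : List String) (guests : List String) : Int :=
  let vip_set := vip_passes.foldl PySem.Set.add PySem.Set.empty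
  guests.foldl (fun counter character =>
    if PySem.Set.contains vip_set character then counter + 1 else counter) 0

-- ===== PORT B =====
def num_VIP_guests_alt (vip_passes : List String) (guests : List String) : Int :=
  let counts := guests.foldl (fun d g => d.insert g (d.getD g 0 + 1)) PySem.Dict.empty
  ((PySem.Set.ofList vip_passes).map (fun v => counts.getD v 0)).sum

-- ===== PRECONDITION & SPEC =====
def Spec_num_VIP_guests (vip_passes : List String) (guests : List String) (out : Int) : Prop := out = num_VIP_guests_alt vip_passes guests
instance (vip_passes : List String) (guests : List String) (out : Int) : Decidable (Spec_num_VIP_guests vip_passes guests out) := by unfold Spec_num_VIP_guests; infer_instance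

-- ===== CLAIM (what is proved, stated in full; the proofs are below) =====
def Claim_equal_num_VIP_guests : Prop := ∀ (vip_passes : List String) (guests : List String), Dom_num_VIP_guests vip_passes guests → Spec_num_VIP_guests vip_passes guests (num_VIP_guests vip_passes guests)

-- ===== LEMMAS AND PROOFS =====

-- ===== VERDICT (by name: the statement is the Claim_ definition above) =====
-- a 0/1-sum over a duplicate-free list is a membership indicator
lemma sum_ite_mem (g : String) (S : List String) (hS : S.Nodup) :
    (S.map (fun v => if g == v then 1 else 0)).sum = (if g ∈ S then (1:ℕ) else 0) := by
  induction S with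
  | nil => simp
  | cons s S ih =>
      simp only [List.nodup_cons] at hS
      by_cases h : g = s
      · subst h
        have h0 : (S.map (fun v => if g = v then 1 else 0)).sum = 0 := by
          rw [List.sum_eq_zero_iff]
          intro x hx
          simp only [List.mem_map] at hx
          obtain ⟨v, hv, rfl⟩ := hx
          have : g ≠ v := by rintro rfl; exact hS.1 hv
          simp [this]
        simp [h0]
      · simp only [List.map_cons, List.sum_cons, ih hS.2]
        simp [h, beq_iff_eq]

-- sum of per-vip occurrence counts over a duplicate-free vip list = number of guests in it
lemma sum_count_eq_countP (S : List String) (hS : S.Nodup) (gs : List String) :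
    (S.map (fun v => gs.count v)).sum = gs.countP (fun g => decide (g ∈ S)) := by
  induction gs with
  | nil => simp
  | cons g gs ih =>
      simp only [List.count_cons, List.countP_cons]
      rw [List.sum_map_add, ih, sum_ite_mem g S hS]
      simp

theorem num_VIP_guests_spec : Claim_equal_num_VIP_guests := by
  intro vip_passes guests _
  unfold Spec_num_VIP_guests num_VIP_guests num_VIP_guests_alt
  rw [PySem.Dict.foldl_insert_getD_add_one_eq_counter]
  simp only [PySem.Dict.getD_counter]
  rw [show vip_passes.foldl PySem.Set.add PySem.Set.empty = PySem.Set.ofList vip_passes from rfl]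
  rw [PySem.List.foldl_if_add_one]
  have hnd := PySem.Set.nodup_ofList (xs := vip_passes)
  have hc : List.countP (PySem.Set.ofList vip_passes).contains guests
      = List.countP (fun g => decide (g ∈ PySem.Set.ofList vip_passes)) guests := by
    apply List.countP_congr
    intro g _
    simp [PySem.Set.contains]
  rw [hc, ← sum_count_eq_countP _ hnd]
  push_cast
  simp [List.map_map, Function.comp_def]
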